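-- pv_equiv track=rewrite | github.com/EmidioLP/lista-de-revis-o | revisão.py | q13
-- ===== SOURCE A (Python) =====
-- def q13(n):
--     soma = 0
--     r = 0
--     while r <= n:
--         if r%2==0:
--             soma = soma+r
--         else:
--             soma = soma - r
--         r= r+1
--     return soma
-- ===== SOURCE B (Python) =====
-- def q13(n):
--     # closed form: alternating sum 0 - 1 + 2 - 3 ... +/- n
--     if n < 0:
--         return 0
--     if n % 2 == 0:
--         return n // 2
--     return -((n + 1) // 2)
-- ===== Notes on version B (the rewrite author's own statement) =====
-- stated objective: faster
-- what changed: Replaces the O(n) while-loop accumulation with an O(1) closed-form formula based on the parity of n.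
import Mathlib
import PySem

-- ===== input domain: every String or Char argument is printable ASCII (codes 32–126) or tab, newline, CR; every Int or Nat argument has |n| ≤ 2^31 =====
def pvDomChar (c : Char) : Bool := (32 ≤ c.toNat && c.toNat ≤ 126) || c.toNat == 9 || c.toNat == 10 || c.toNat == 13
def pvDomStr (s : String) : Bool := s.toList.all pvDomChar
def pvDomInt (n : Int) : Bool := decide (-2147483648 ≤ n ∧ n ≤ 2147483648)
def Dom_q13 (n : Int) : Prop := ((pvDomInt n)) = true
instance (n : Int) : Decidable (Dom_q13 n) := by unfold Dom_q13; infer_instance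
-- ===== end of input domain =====

-- B replaces A's O(n) accumulating while-loop by an O(1) closed-form formula on the parity of n.

-- ===== PORT A =====
-- literal port of A's while loop: state (soma, r), iterate while r ≤ n
def q13Loop (n soma r : Int) : Int :=
  if _h : r ≤ n then
    q13Loop n (if PySem.Int.mod r 2 = 0 then soma + r else soma - r) (r + 1)
  else soma
termination_by (n + 1 - r).toNat
decreasing_by omega

def q13 (n : Int) : Int := q13Loop n 0 0

-- ===== PORT B =====
def q13_alt (n : Int) : Int :=
  if n < 0 then 0
  else if PySem.Int.mod n 2 = 0 then PySem.Int.floordiv n 2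
  else -(PySem.Int.floordiv (n + 1) 2)

-- ===== PRECONDITION & SPEC =====
def Spec_q13 (n : Int) (out : Int) : Prop := out = q13_alt n
instance (n : Int) (out : Int) : Decidable (Spec_q13 n out) := by unfold Spec_q13; infer_instance

-- ===== CLAIM (what is proved, stated in full; the proofs are below) =====
def Claim_equal_q13 : Prop := ∀ (n : Int), Dom_q13 n → Spec_q13 n (q13 n)

-- ===== LEMMAS AND PROOFS =====

-- closed form of the alternating sum 0..m (pvF (-1) = 0), the loop invariant's potential
def pvF (m : Int) : Int := if m % 2 = 0 then m / 2 else -((m + 1) / 2)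

theorem pvF_step (r : Int) (hr : 0 ≤ r) :
    pvF r = pvF (r - 1) + (if r % 2 = 0 then r else -r) := by
  unfold pvF
  omega

theorem q13Loop_eq (n : Int) (_hn : 0 ≤ n) : ∀ (k : Nat) (r soma : Int), 0 ≤ r → r ≤ n + 1 →
    (n + 1 - r).toNat = k → q13Loop n soma r = soma + pvF n - pvF (r - 1) := by
  intro k
  induction k with
  | zero =>
    intro r soma hr hrn hk
    rw [q13Loop]
    have h1 : ¬ r ≤ n := by omega
    simp only [h1, dite_false]
    have h2 : r - 1 = n := by omega
    rw [h2]
    omega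
  | succ k ih =>
    intro r soma hr hrn hk
    rw [q13Loop]
    have hle : r ≤ n := by omega
    simp only [hle, dite_true]
    rw [ih (r + 1) _ (by omega) (by omega) (by omega)]
    have hmod : PySem.Int.mod r 2 = r % 2 := PySem.Int.mod_eq_emod_of_pos (by omega)
    have hs := pvF_step r hr
    have h3 : r + 1 - 1 = r := by ring
    rw [hmod, h3]
    split_ifs at hs ⊢ <;> omega

theorem pvF_eq_alt (n : Int) (hn : 0 ≤ n) : pvF n = q13_alt n := by
  unfold pvF q13_alt
  rw [PySem.Int.mod_eq_emod_of_pos (a := n) (by omega),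
      PySem.Int.floordiv_eq_ediv_of_pos (a := n) (by omega),
      PySem.Int.floordiv_eq_ediv_of_pos (a := n + 1) (by omega)]
  split_ifs <;> omega

-- ===== VERDICT (by name: the statement is the Claim_ definition above) =====
theorem q13_spec : Claim_equal_q13 := by
  intro n _
  unfold Spec_q13 q13
  by_cases hn : 0 ≤ n
  · rw [q13Loop_eq n hn ((n + 1 - 0).toNat) 0 0 le_rfl (by omega) rfl]
    have h0 : pvF (0 - 1) = 0 := by unfold pvF; decide
    rw [pvF_eq_alt n hn]
    omega
  · rw [q13Loop]
    have h1 : ¬ (0 : Int) ≤ n := hn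
    simp only [h1, dite_false]
    unfold q13_alt
    simp [show n < 0 by omega]
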